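-- pv_equiv track=rewrite | github.com/wmentrekin/nba-asset-lineage | src/visualization.py | _event_date_bounds
-- ===== SOURCE A (Python) =====
-- def _event_date_bounds(nodes: list[dict[str, str]]) -> tuple[str, str]:
--     dates = sorted(
--         {
--             node.get("event_date", "")
--             for node in nodes
--             if node.get("event_date", "") and node.get("node_type") == "event"
--         }
--     )
--     if not dates:
--         return "", ""
--     return dates[0], dates[-1]
-- ===== SOURCE B (Python) =====
-- def _event_date_bounds(nodes: list[dict[str, str]]) -> tuple[str, str]:
--     lo = hi = None
--     for node in nodes:
--         d = node.get("event_date", "")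
--         if d and node.get("node_type") == "event":
--             if lo is None:
--                 lo = hi = d
--             else:
--                 if d < lo:
--                     lo = d
--                 if d > hi:
--                     hi = d
--     if lo is None:
--         return "", ""
--     return lo, hi
-- ===== Notes on version B (the rewrite author's own statement) =====
-- stated objective: alternative
-- what changed: Replaces the set-comprehension plus sort with a single pass keeping running min/max (lo, hi) of qualifying event dates, returning ('','') if none were seen.
import Mathlib
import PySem

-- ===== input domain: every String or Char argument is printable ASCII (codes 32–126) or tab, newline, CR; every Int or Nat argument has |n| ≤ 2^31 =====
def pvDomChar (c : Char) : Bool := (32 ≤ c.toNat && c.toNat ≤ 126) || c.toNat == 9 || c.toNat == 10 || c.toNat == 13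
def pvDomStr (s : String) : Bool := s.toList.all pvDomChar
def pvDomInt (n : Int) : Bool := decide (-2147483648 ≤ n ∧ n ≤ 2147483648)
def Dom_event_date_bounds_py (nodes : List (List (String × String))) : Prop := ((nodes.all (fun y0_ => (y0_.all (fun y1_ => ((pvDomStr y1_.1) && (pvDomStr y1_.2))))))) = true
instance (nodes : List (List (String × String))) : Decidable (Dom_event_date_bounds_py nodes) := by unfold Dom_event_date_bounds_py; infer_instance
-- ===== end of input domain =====

-- B replaces A's set-comprehension + sort with one pass keeping running min/max of qualifying dates.

-- ===== PORT A =====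
-- node qualifies: truthy "event_date" and node_type == "event" (shared by both Pythons verbatim)
def pvNodeQual (node : List (String × String)) : Bool :=
  decide (PySem.Dict.getD (PySem.Dict.mk node) "event_date" "" ≠ "") &&
  (PySem.Dict.get? (PySem.Dict.mk node) "node_type" == some "event")

def pvNodeDate (node : List (String × String)) : String :=
  PySem.Dict.getD (PySem.Dict.mk node) "event_date" ""

def event_date_bounds_py (nodes : List (List (String × String))) : String × String :=
  let dates := PySem.List.sorted
    (PySem.Set.ofList ((nodes.filter pvNodeQual).map pvNodeDate)) (fun s => s) false
  if dates = [] then ("", "")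
  else (PySem.List.pyGetD dates 0 "", PySem.List.pyGetD dates (-1) "")

-- ===== PORT B =====
def pvStep (acc : Option (String × String)) (node : List (String × String)) :
    Option (String × String) :=
  let d := pvNodeDate node
  if pvNodeQual node then
    match acc with
    | none => some (d, d)
    | some (lo, hi) => some (min lo d, max hi d)
  else acc

def event_date_bounds_py_alt (nodes : List (List (String × String))) : String × String :=
  match nodes.foldl pvStep none with
  | none => ("", "")
  | some (lo, hi) => (lo, hi)

-- ===== PRECONDITION & SPEC =====
def Spec_event_date_bounds_py (nodes : List (List (String × String))) (out : String × String) : Prop := out = event_date_bounds_py_alt nodes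
instance (nodes : List (List (String × String))) (out : String × String) : Decidable (Spec_event_date_bounds_py nodes out) := by unfold Spec_event_date_bounds_py; infer_instance

-- ===== CLAIM (what is proved, stated in full; the proofs are below) =====
def Claim_equal_event_date_bounds_py : Prop := ∀ (nodes : List (List (String × String))), Dom_event_date_bounds_py nodes → Spec_event_date_bounds_py nodes (event_date_bounds_py nodes)

-- ===== LEMMAS AND PROOFS =====

-- min/max fold on pairs, used to characterise B's single pass
def pvMM (acc : Option (String × String)) (d : String) : Option (String × String) :=
  match acc with
  | none => some (d, d)
  | some (lo, hi) => some (min lo d, max hi d)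

theorem foldl_pvStep_eq (nodes : List (List (String × String)))
    (acc : Option (String × String)) :
    nodes.foldl pvStep acc = ((nodes.filter pvNodeQual).map pvNodeDate).foldl pvMM acc := by
  induction nodes generalizing acc with
  | nil => rfl
  | cons n t ih =>
    by_cases h : pvNodeQual n
    · simp [h, pvStep, pvMM, ih]
    · simp [h, pvStep, ih]

theorem foldl_pvMM_some (t : List String) (lo hi : String) :
    t.foldl pvMM (some (lo, hi)) = some (t.foldl min lo, t.foldl max hi) := by
  induction t generalizing lo hi with
  | nil => rfl
  | cons d t ih => simp [List.foldl_cons, pvMM, ih]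

theorem foldl_pvMM_cons (d : String) (t : List String) :
    (d :: t).foldl pvMM none = some (t.foldl min d, t.foldl max d) := by
  simp [List.foldl_cons, pvMM, foldl_pvMM_some]

theorem sorted_set_cons_min_max (d : String) (t : List String) (m : String) (r : List String)
    (hcons : PySem.List.sorted (PySem.Set.ofList (d :: t)) (fun s : String => s) false = m :: r) :
    m = t.foldl min d ∧ (m :: r).getLast (by simp) = t.foldl max d := by
  have hmemS : ∀ y : String, y ∈ m :: r ↔ y ∈ d :: t := by
    intro y
    rw [← hcons, PySem.List.mem_sorted, PySem.Set.mem_ofList]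
  have hhead : ∀ y ∈ (d :: t : List String), m ≤ y := by
    intro y hy
    exact PySem.List.key_head_sorted_le _ (fun s : String => s) hcons y
      ((PySem.Set.mem_ofList _ y).mpr hy)
  have hlast_ub : ∀ y ∈ m :: r, y ≤ (m :: r).getLast (by simp) := by
    intro y hy
    obtain ⟨p, hp, hyp⟩ := List.getElem_of_mem hy
    rw [List.getLast_eq_getElem, ← hyp]
    have hlen : (m :: r).length - 1 < (PySem.List.sorted (PySem.Set.ofList (d :: t)) (fun s : String => s) false).length := by
      rw [hcons]; simp
    have := PySem.List.sorted_id_getElem_mono (PySem.Set.ofList (d :: t))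
      (p := p) (q := (m :: r).length - 1) (by omega) hlen
    simpa [hcons] using this
  constructor
  · -- head is the minimum
    refine le_antisymm ?_ ?_
    · rcases PySem.List.foldl_min_mem t d with h | h
      · rw [h]; exact hhead d (by simp)
      · exact hhead _ (List.mem_cons_of_mem _ h)
    · have hm : m ∈ d :: t := (hmemS m).mp (by simp)
      rcases List.mem_cons.mp hm with heq | hm
      · rw [heq]; exact (PySem.List.foldl_min_le t d).1
      · exact (PySem.List.foldl_min_le t d).2 m hm
  · -- last is the maximum
    refine le_antisymm ?_ ?_
    · have hmem : (m :: r).getLast (by simp) ∈ d :: t :=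
        (hmemS _).mp (List.getLast_mem _)
      rcases List.mem_cons.mp hmem with heq | hmem
      · rw [heq]; exact (PySem.List.le_foldl_max t d).1
      · exact (PySem.List.le_foldl_max t d).2 _ hmem
    · rcases PySem.List.foldl_max_mem t d with h | h
      · rw [h]; exact hlast_ub d ((hmemS d).mpr (by simp))
      · exact hlast_ub _ ((hmemS _).mpr (List.mem_cons_of_mem _ h))

-- ===== VERDICT (by name: the statement is the Claim_ definition above) =====
theorem event_date_bounds_py_spec : Claim_equal_event_date_bounds_py := by
  intro nodes _
  unfold Spec_event_date_bounds_py event_date_bounds_py event_date_bounds_py_alt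
  rw [foldl_pvStep_eq]
  cases hds : (nodes.filter pvNodeQual).map pvNodeDate with
  | nil => rfl
  | cons d t =>
    rw [foldl_pvMM_cons]
    have hS : PySem.List.sorted (PySem.Set.ofList (d :: t)) (fun s : String => s) false ≠ [] := by
      rw [Ne, PySem.List.sorted_eq_nil_iff]
      intro h
      have : d ∈ PySem.Set.ofList (d :: t) := (PySem.Set.mem_ofList _ d).mpr (by simp)
      simp [h] at this
    obtain ⟨m, r, hcons⟩ := List.exists_cons_of_ne_nil hS
    obtain ⟨hmin, hmax⟩ := sorted_set_cons_min_max d t m r hcons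
    simp only [hcons, PySem.List.pyGetD_zero_cons]
    rw [PySem.List.pyGetD_neg_one _ _ (by simp), hmax, hmin]
    simp
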